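-- pv_equiv track=rewrite | github.com/BenjaminDev75/Ricosheep | fonction.py | victoire2
-- ===== SOURCE A (Python) =====
-- def victoire2(plateau,moutons):
--     """
--     Détecte si le joueur a gagné ou non en vérifiant si un mouton est présent dans chaque herbe
--
--     :Paramètre moutons: Position des moutons
--     :Paramètre plateau: Taille du plateau, position des buissons et des herbes
--     :Type: int
--     """
--     for a in range(len(plateau)):
--         for i in range( len(plateau[a])):
--
--             if plateau[a][i] == 'G':
--                 nb_S = 0
--                 for mout in moutons:
--                     if mout != (a, i):
--                         nb_S += 1
--                 if nb_S == len(moutons):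
--                     return False
--     return True
-- ===== SOURCE B (Python) =====
-- def victoire2(plateau, moutons):
--     # Paint-and-sweep: copy the board, overwrite each in-bounds sheep position,
--     # then a single scan succeeds iff no grass cell is left unpainted.
--     rows = [list(row) for row in plateau]
--     for a, i in moutons:
--         if 0 <= a < len(rows) and 0 <= i < len(rows[a]):
--             rows[a][i] = '#'
--     return all(c != 'G' for row in rows for c in row)
-- ===== Notes on version B (the rewrite author's own statement) =====
-- stated objective: alternative
-- what changed: Instead of A's per-cell nested scan that counts sheep not on each grass cell, B paints: it copies the board, overwrites the board cell under every in-bounds sheep, then makes one sweep checking that no 'G' remains unpainted.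
import Mathlib
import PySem

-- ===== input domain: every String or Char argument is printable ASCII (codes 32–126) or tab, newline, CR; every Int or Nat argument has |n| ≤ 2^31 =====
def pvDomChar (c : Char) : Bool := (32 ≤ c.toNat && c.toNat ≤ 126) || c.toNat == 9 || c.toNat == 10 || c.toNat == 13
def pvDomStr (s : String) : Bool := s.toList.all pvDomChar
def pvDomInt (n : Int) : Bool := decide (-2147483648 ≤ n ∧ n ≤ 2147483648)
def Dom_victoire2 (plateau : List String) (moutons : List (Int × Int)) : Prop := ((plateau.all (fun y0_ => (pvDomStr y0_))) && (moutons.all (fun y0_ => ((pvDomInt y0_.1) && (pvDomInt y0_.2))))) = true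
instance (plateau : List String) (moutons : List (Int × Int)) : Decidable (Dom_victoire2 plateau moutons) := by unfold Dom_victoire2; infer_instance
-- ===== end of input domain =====

-- B replaces A's per-grass-cell counting scan by paint-and-sweep: overwrite the board
-- cell under every in-bounds sheep, then one sweep checks no 'G' remains (objective: alternative).

-- ===== PORT A =====
-- the inner 'for mout in moutons: if mout != (a,i): nb_S += 1'
def pvCountNe (moutons : List (Int × Int)) (p : Int × Int) : Int :=
  moutons.foldl (fun nb mout => if mout ≠ p then nb + 1 else nb) 0

-- the 'for i in range(len(plateau[a]))' loop at row index a, current column i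
def pvRowLoop (a : Int) (row : List Char) (i : Int) (moutons : List (Int × Int)) : Bool :=
  match row with
  | [] => true
  | c :: rest =>
    if c = 'G' then
      if pvCountNe moutons (a, i) = (moutons.length : Int) then false
      else pvRowLoop a rest (i + 1) moutons
    else pvRowLoop a rest (i + 1) moutons

-- the 'for a in range(len(plateau))' loop
def pvRowsLoop (plateau : List String) (a : Int) (moutons : List (Int × Int)) : Bool :=
  match plateau with
  | [] => true
  | r :: rest =>
    if pvRowLoop a r.toList 0 moutons then pvRowsLoop rest (a + 1) moutons else false

def victoire2 (plateau : List String) (moutons : List (Int × Int)) : Bool :=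
  pvRowsLoop plateau 0 moutons

-- ===== PORT B =====
-- one iteration of 'for a, i in moutons: if 0 <= a < len(rows) and 0 <= i < len(rows[a]): rows[a][i] = "#"'
def pvPaintOne (rows : List (List Char)) (m : Int × Int) : List (List Char) :=
  if 0 ≤ m.1 ∧ m.1 < (rows.length : Int) ∧ 0 ≤ m.2 ∧ m.2 < ((rows.getD m.1.toNat []).length : Int) then
    rows.set m.1.toNat ((rows.getD m.1.toNat []).set m.2.toNat '#')
  else rows

def victoire2_alt (plateau : List String) (moutons : List (Int × Int)) : Bool :=
  -- rows = [list(row) for row in plateau]; paint loop; final all(...) sweep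
  (moutons.foldl pvPaintOne (plateau.map String.toList)).all (fun row => row.all (fun c => c ≠ 'G'))

-- ===== PRECONDITION & SPEC =====
def Spec_victoire2 (plateau : List String) (moutons : List (Int × Int)) (out : Bool) : Prop := out = victoire2_alt plateau moutons
instance (plateau : List String) (moutons : List (Int × Int)) (out : Bool) : Decidable (Spec_victoire2 plateau moutons out) := by unfold Spec_victoire2; infer_instance

-- ===== CLAIM (what is proved, stated in full; the proofs are below) =====
def Claim_equal_victoire2 : Prop := ∀ (plateau : List String) (moutons : List (Int × Int)), Dom_victoire2 plateau moutons → Spec_victoire2 plateau moutons (victoire2 plateau moutons)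

-- ===== LEMMAS AND PROOFS =====

-- ---- A side: the nested loops say 'every grass cell is a sheep position' ----

theorem pvCountNe_aux (m : List (Int × Int)) (p : Int × Int) (nb : Int) :
    m.foldl (fun nb mout => if mout ≠ p then nb + 1 else nb) nb
      = nb + ((m.filter (fun x => x ≠ p)).length : Int) := by
  induction m generalizing nb with
  | nil => simp
  | cons x xs ih =>
    by_cases hx : x = p
    · simp only [List.foldl_cons, if_neg (show ¬ x ≠ p by simp [hx])]
      rw [ih, List.filter_cons_of_neg (by simp [hx])]
    · simp only [List.foldl_cons, if_pos (show x ≠ p from hx)]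
      rw [ih, List.filter_cons_of_pos (by simp [hx])]
      simp only [List.length_cons]; push_cast; omega

theorem pvCountNe_eq_len_iff (m : List (Int × Int)) (p : Int × Int) :
    pvCountNe m p = (m.length : Int) ↔ p ∉ m := by
  unfold pvCountNe
  rw [pvCountNe_aux]
  simp only [Int.zero_add, Int.natCast_inj]
  constructor
  · intro h hp
    have := List.length_filter_eq_length_iff.mp h p hp
    simp at this
  · intro h
    apply List.length_filter_eq_length_iff.mpr
    intro x hx
    simp
    rintro rfl; exact h hx

theorem pvRowLoop_iff (a : Int) (row : List Char) (i : Int) (m : List (Int × Int)) :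
    pvRowLoop a row i m = true ↔
      ∀ ic ∈ PySem.List.enumerate row i, ic.2 = 'G' → (a, ic.1) ∈ m := by
  induction row generalizing i with
  | nil => simp [pvRowLoop, PySem.List.enumerate_nil]
  | cons c rest ih =>
    rw [PySem.List.enumerate_cons]
    by_cases hc : c = 'G'
    · by_cases hcnt : pvCountNe m (a, i) = (m.length : Int)
      · have hnot := (pvCountNe_eq_len_iff m (a, i)).mp hcnt
        rw [show pvRowLoop a (c :: rest) i m = false by simp [pvRowLoop, hc, hcnt]]
        simp only [Bool.false_eq_true, false_iff]
        intro h
        exact hnot (h (i, c) (List.mem_cons_self ..) hc)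
      · have hin : (a, i) ∈ m := by
          by_contra hn
          exact hcnt ((pvCountNe_eq_len_iff m (a, i)).mpr hn)
        simp [pvRowLoop, hc, hcnt, ih, hin]
    · simp [pvRowLoop, hc, ih]

theorem pvRowsLoop_iff (plateau : List String) (a : Int) (m : List (Int × Int)) :
    pvRowsLoop plateau a m = true ↔
      ∀ ar ∈ PySem.List.enumerate plateau a,
        ∀ ic ∈ PySem.List.enumerate ar.2.toList 0, ic.2 = 'G' → (ar.1, ic.1) ∈ m := by
  induction plateau generalizing a with
  | nil => simp [pvRowsLoop, PySem.List.enumerate_nil]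
  | cons r rest ih =>
    rw [PySem.List.enumerate_cons]
    rw [show pvRowsLoop (r :: rest) a m
        = (if pvRowLoop a r.toList 0 m then pvRowsLoop rest (a + 1) m else false) from rfl]
    by_cases hr : pvRowLoop a r.toList 0 m = true
    · rw [if_pos hr, ih]
      constructor
      · intro h ar har ic hic hg
        rcases List.mem_cons.mp har with rfl | har'
        · exact (pvRowLoop_iff a r.toList 0 m).mp hr ic hic hg
        · exact h ar har' ic hic hg
      · intro h ar har ic hic hg
        exact h ar (List.mem_cons_of_mem _ har) ic hic hg
    · rw [if_neg hr]
      simp only [Bool.false_eq_true, false_iff]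
      intro h
      exact hr ((pvRowLoop_iff a r.toList 0 m).mpr
        (fun ic hic hg => h (a, r) (List.mem_cons_self ..) ic hic hg))

theorem victoire2_iff (plateau : List String) (m : List (Int × Int)) :
    victoire2 plateau m = true ↔
      ∀ (a : Nat), (ha : a < plateau.length) → ∀ (i : Nat), (hi : i < plateau[a].toList.length) →
        plateau[a].toList[i] = 'G' → ((a : Int), (i : Int)) ∈ m := by
  rw [show victoire2 plateau m = pvRowsLoop plateau 0 m from rfl, pvRowsLoop_iff]
  constructor
  · intro h a ha i hi hg
    have := h ((a : Int), plateau[a])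
      ((PySem.List.mem_enumerate_iff _ _ _).mpr ⟨a, ha, by simp⟩)
      ((i : Int), plateau[a].toList[i])
      ((PySem.List.mem_enumerate_iff _ _ _).mpr ⟨i, hi, by simp⟩) hg
    exact this
  · intro h ar har ic hic hg
    obtain ⟨a, ha, rfl⟩ := (PySem.List.mem_enumerate_iff _ _ _).mp har
    obtain ⟨i, hi, rfl⟩ := (PySem.List.mem_enumerate_iff _ _ _).mp hic
    simpa using h a ha i hi (by simpa using hg)

-- ---- B side: the painted grid cell characterization ----

theorem pvGetD_set_self (l : List (List Char)) (a : Nat) (x : List Char) (h : a < l.length) :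
    (l.set a x).getD a [] = x := by
  rw [List.getD_eq_getElem _ _ (by simpa using h)]; simp

theorem pvGetD_set_ne (l : List (List Char)) (k a : Nat) (x : List Char) (h : k ≠ a) :
    (l.set k x).getD a [] = l.getD a [] := by
  simp [List.getD_eq_getElem?_getD, List.getElem?_set_ne h]

theorem pvGetD_set_self_char (l : List Char) (i : Nat) (x : Char) (h : i < l.length) :
    (l.set i x).getD i ' ' = x := by
  rw [List.getD_eq_getElem _ _ (by simpa using h)]; simp

theorem pvGetD_set_ne_char (l : List Char) (j i : Nat) (x : Char) (h : j ≠ i) :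
    (l.set j x).getD i ' ' = l.getD i ' ' := by
  simp [List.getD_eq_getElem?_getD, List.getElem?_set_ne h]

theorem pvPaintOne_length (rows : List (List Char)) (m : Int × Int) :
    (pvPaintOne rows m).length = rows.length := by
  unfold pvPaintOne; split <;> simp

theorem pvPaintOne_row_length (rows : List (List Char)) (m : Int × Int) (a : Nat) :
    ((pvPaintOne rows m).getD a []).length = (rows.getD a []).length := by
  unfold pvPaintOne
  split
  · rename_i hcond
    by_cases hk : m.1.toNat = a
    · rw [hk, pvGetD_set_self _ _ _ (by omega)]; simp
    · rw [pvGetD_set_ne _ _ _ _ hk]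
  · rfl

theorem pvPaintOne_cell (rows : List (List Char)) (m : Int × Int) (a i : Nat)
    (ha : a < rows.length) (hi : i < (rows.getD a []).length) :
    (((pvPaintOne rows m).getD a []).getD i ' ' = 'G' ↔
      ((rows.getD a []).getD i ' ' = 'G' ∧ m ≠ ((a : Int), (i : Int)))) := by
  unfold pvPaintOne
  split
  · rename_i hcond
    obtain ⟨h1, h2, h3, h4⟩ := hcond
    by_cases hk : m.1.toNat = a
    · have hm1 : m.1 = (a : Int) := by omega
      rw [hk, pvGetD_set_self _ _ _ ha]
      by_cases hj : m.2.toNat = i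
      · have hm2 : m.2 = (i : Int) := by omega
        rw [hj, pvGetD_set_self_char _ _ _ (by rw [← hk]; exact hk ▸ hi)]
        constructor
        · intro h; exact absurd h (by decide)
        · rintro ⟨-, hne⟩; exact absurd (Prod.ext hm1 hm2) hne
      · have hm2 : m.2 ≠ (i : Int) := by omega
        rw [pvGetD_set_ne_char _ _ _ _ hj]
        simp only [iff_self_and]
        intro _; rintro rfl; exact hm2 rfl
    · have hm1 : m.1 ≠ (a : Int) := by omega
      rw [pvGetD_set_ne _ _ _ _ hk]
      simp only [iff_self_and]
      intro _; rintro rfl; exact hm1 rfl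
  · rename_i hcond
    simp only [iff_self_and]
    intro _
    rintro rfl
    apply hcond
    refine ⟨by positivity, ?_, by positivity, ?_⟩
    · show (a : Int) < (rows.length : Int); exact_mod_cast ha
    · show (i : Int) < (((rows.getD ((a : Int)).toNat []).length : Int))
      simp only [Int.toNat_natCast]
      exact_mod_cast hi

theorem paint_fold_length (ms : List (Int × Int)) (rows : List (List Char)) :
    (ms.foldl pvPaintOne rows).length = rows.length := by
  induction ms generalizing rows with
  | nil => rfl
  | cons m ms ih => rw [List.foldl_cons, ih, pvPaintOne_length]

theorem paint_fold_row_length (ms : List (Int × Int)) (rows : List (List Char)) (a : Nat) :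
    ((ms.foldl pvPaintOne rows).getD a []).length = (rows.getD a []).length := by
  induction ms generalizing rows with
  | nil => rfl
  | cons m ms ih => rw [List.foldl_cons, ih, pvPaintOne_row_length]

theorem paint_fold_cell (ms : List (Int × Int)) (rows : List (List Char)) (a i : Nat)
    (ha : a < rows.length) (hi : i < (rows.getD a []).length) :
    (((ms.foldl pvPaintOne rows).getD a []).getD i ' ' = 'G' ↔
      ((rows.getD a []).getD i ' ' = 'G' ∧ ((a : Int), (i : Int)) ∉ ms)) := by
  induction ms generalizing rows with
  | nil => simp
  | cons m ms ih =>
    rw [List.foldl_cons]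
    rw [ih (pvPaintOne rows m) (by rw [pvPaintOne_length]; exact ha)
        (by rw [pvPaintOne_row_length]; exact hi)]
    rw [pvPaintOne_cell rows m a i ha hi]
    simp only [List.mem_cons, not_or]
    constructor
    · rintro ⟨⟨hg, hne⟩, hnotin⟩
      exact ⟨hg, fun h => hne h.symm, hnotin⟩
    · rintro ⟨hg, hne, hnotin⟩
      exact ⟨⟨hg, fun h => hne h.symm⟩, hnotin⟩

theorem victoire2_alt_iff (plateau : List String) (m : List (Int × Int)) :
    victoire2_alt plateau m = true ↔
      ∀ (a : Nat), (ha : a < plateau.length) → ∀ (i : Nat), (hi : i < plateau[a].toList.length) →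
        plateau[a].toList[i] = 'G' → ((a : Int), (i : Int)) ∈ m := by
  unfold victoire2_alt
  set rows := plateau.map String.toList with hrows
  have hlen : rows.length = plateau.length := by simp [hrows]
  have hrow : ∀ (a : Nat) (ha : a < plateau.length), rows.getD a [] = (plateau[a]'ha).toList := by
    intro a ha
    rw [List.getD_eq_getElem _ _ (by omega)]
    simp [hrows]
  have hsweep : ((m.foldl pvPaintOne rows).all fun row => row.all fun c => c ≠ 'G') = true ↔
      ∀ (a : Nat), a < (m.foldl pvPaintOne rows).length →
        ∀ (i : Nat), i < ((m.foldl pvPaintOne rows).getD a []).length →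
          ((m.foldl pvPaintOne rows).getD a []).getD i ' ' ≠ 'G' := by
    rw [List.all_eq_true]
    constructor
    · intro h a ha i hi
      have hramem : (m.foldl pvPaintOne rows).getD a [] ∈ m.foldl pvPaintOne rows := by
        rw [List.getD_eq_getElem _ _ ha]; exact List.getElem_mem ha
      have hxmem : ((m.foldl pvPaintOne rows).getD a []).getD i ' '
          ∈ (m.foldl pvPaintOne rows).getD a [] := by
        rw [List.getD_eq_getElem _ _ hi]; exact List.getElem_mem hi
      have := List.all_eq_true.mp (h _ hramem) _ hxmem
      simpa using this
    · intro h row hrmem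
      rw [List.all_eq_true]
      intro c hcmem
      obtain ⟨a, halen, harow⟩ := List.mem_iff_getElem.mp hrmem
      obtain ⟨i, hilen, hic⟩ := List.mem_iff_getElem.mp hcmem
      have hrd : (m.foldl pvPaintOne rows).getD a [] = row := by
        rw [List.getD_eq_getElem _ _ halen]; exact harow
      have := h a halen i (by rw [hrd]; exact hilen)
      rw [hrd, List.getD_eq_getElem _ _ hilen, hic] at this
      simpa using this
  rw [hsweep]
  constructor
  · intro h a ha i hi hg
    by_contra hnotin
    have := h a (by rw [paint_fold_length]; omega) i
      (by rw [paint_fold_row_length, hrow a ha]; exact hi)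
    apply this
    rw [paint_fold_cell m rows a i (by omega) (by rw [hrow a ha]; exact hi)]
    exact ⟨by rw [hrow a ha, List.getD_eq_getElem _ _ hi]; exact hg, hnotin⟩
  · intro h a ha i hi
    have ha' : a < plateau.length := by rw [paint_fold_length, hlen] at ha; exact ha
    have hi' : i < plateau[a].toList.length := by
      rw [paint_fold_row_length, hrow a ha'] at hi; exact hi
    intro hG
    rw [paint_fold_cell m rows a i (by omega) (by rw [hrow a ha']; exact hi')] at hG
    obtain ⟨hg, hnotin⟩ := hG
    rw [hrow a ha', List.getD_eq_getElem _ _ hi'] at hg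
    exact hnotin (h a ha' i hi' hg)

-- ===== VERDICT (by name: the statement is the Claim_ definition above) =====
theorem victoire2_spec : Claim_equal_victoire2 := by
  intro plateau moutons _
  unfold Spec_victoire2
  rw [Bool.eq_iff_iff, victoire2_iff, victoire2_alt_iff]
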